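-- pv_equiv track=rewrite | github.com/Tcpat/MIT-py | toothpick.py | toothpick
-- ===== SOURCE A (Python) =====
-- def toothpick(n):
--     def toothpick1(n):
--         if n == 0:
--             return 0
--         if n == 1:
--             return 1
--         else:
--             power = 0
--             while (n - 2 ** power) > 0:
--                 power += 1
--             if n - 2 ** power == 0:
--                 return 2 ** power
--             else:
--                 power -= 1
--                 i = n - 2 ** power
--                 return 2 * toothpick1(i) + toothpick1(i + 1)
--
--     def totaltoothpick(n):
--         total = 0
--         for i in range(n):
--             total += toothpick1(n - i)
--         return total
--
--     return totaltoothpick(n)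
-- ===== SOURCE B (Python) =====
-- def toothpick(n):
--     # Bottom-up DP table instead of naive recursion: t[k] holds toothpick1(k).
--     if n <= 0:
--         return 0
--     t = [0, 1]
--     for k in range(2, n + 1):
--         p = 1
--         while 2 * p <= k:
--             p *= 2
--         if p == k:
--             t.append(k)
--         else:
--             i = k - p
--             t.append(2 * t[i] + t[i + 1])
--     return sum(t[1:])
-- ===== Notes on version B (the rewrite author's own statement) =====
-- stated objective: faster
-- what changed: Replaces the memo-less recursive toothpick1 re-evaluated for every k with a single bottom-up DP table t[0..n] filled once and summed.
import Mathlib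
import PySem

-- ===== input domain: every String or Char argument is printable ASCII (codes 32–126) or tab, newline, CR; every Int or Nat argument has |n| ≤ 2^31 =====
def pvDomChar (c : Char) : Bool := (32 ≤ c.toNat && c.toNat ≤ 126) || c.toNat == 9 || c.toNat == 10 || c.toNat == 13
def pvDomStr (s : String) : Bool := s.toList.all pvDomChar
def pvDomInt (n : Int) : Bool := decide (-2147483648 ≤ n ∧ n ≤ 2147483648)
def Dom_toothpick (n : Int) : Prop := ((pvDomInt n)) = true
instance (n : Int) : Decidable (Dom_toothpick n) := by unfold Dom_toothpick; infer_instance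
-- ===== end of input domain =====

-- B replaces the memo-less recursive toothpick1 with a bottom-up DP table filled once and summed.

-- ===== PORT A =====
-- the `while (n - 2 ** power) > 0: power += 1` loop of toothpick1
-- (the fuel argument only makes the loop total; n.toNat + 1 iterations always suffice)
def findPowA (fuel : Nat) (n : Int) (power : Nat) : Nat :=
  match fuel with
  | 0 => power
  | fuel + 1 => if n - 2 ^ power > 0 then findPowA fuel n (power + 1) else power

-- inner recursive toothpick1; the fuel argument only makes the recursion total
-- (fuel n.toNat is always sufficient on the arguments the outer loop supplies)
def toothpick1 (fuel : Nat) (n : Int) : Int :=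
  match fuel with
  | 0 => 0
  | fuel + 1 =>
    if n = 0 then 0
    else if n = 1 then 1
    else
      let power := findPowA (n.toNat + 1) n 0
      if n - 2 ^ power = 0 then 2 ^ power
      else
        let power' := power - 1
        let i := n - 2 ^ power'
        2 * toothpick1 fuel i + toothpick1 fuel (i + 1)

def toothpick (n : Int) : Int :=
  (PySem.List.pyRange 0 n 1).foldl
    (fun total i => total + toothpick1 (n - i).toNat (n - i)) 0

-- ===== PORT B =====
-- the `p = 1; while 2 * p <= k: p *= 2` loop of Source B
-- (the fuel argument only makes the loop total; k iterations always suffice)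
def findP (fuel : Nat) (p k : Nat) : Nat :=
  match fuel with
  | 0 => p
  | fuel + 1 => if 2 * p ≤ k then findP fuel (2 * p) k else p

-- body of Source B's for-loop: the value appended for index k, given the table so far
def tval (t : List Int) (k : Nat) : Int :=
  let p := findP k 1 k
  if p = k then (k : Int) else 2 * t.getD (k - p) 0 + t.getD (k - p + 1) 0

-- Source B's accumulation of the list t (t = [0, 1]; for k in range(2, n+1): t.append(...))
def buildT : Nat → List Int
  | 0 => [0]
  | 1 => [0, 1]
  | (k + 2) => buildT (k + 1) ++ [tval (buildT (k + 1)) (k + 2)]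

def toothpick_alt (n : Int) : Int :=
  if n ≤ 0 then 0 else ((buildT n.toNat).drop 1).sum

-- ===== PRECONDITION & SPEC =====
def Spec_toothpick (n : Int) (out : Int) : Prop := out = toothpick_alt n
instance (n : Int) (out : Int) : Decidable (Spec_toothpick n out) := by unfold Spec_toothpick; infer_instance

-- ===== CLAIM (what is proved, stated in full; the proofs are below) =====
def Claim_equal_toothpick : Prop := ∀ (n : Int), Dom_toothpick n → Spec_toothpick n (toothpick n)

-- ===== LEMMAS AND PROOFS =====

theorem findPowA_le (fuel : Nat) (n : Int) : ∀ power, n ≤ 2 ^ (power + fuel) →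
    n ≤ 2 ^ (findPowA fuel n power) := by
  induction fuel with
  | zero => intro power h; simpa [findPowA] using h
  | succ fuel ih =>
    intro power h
    rw [findPowA]
    by_cases hc : n - 2 ^ power > 0
    · rw [if_pos hc]
      apply ih
      have e : power + 1 + fuel = power + (fuel + 1) := by omega
      rw [e]; exact h
    · rw [if_neg hc]; omega

theorem findPowA_min (fuel : Nat) (n : Int) :
    ∀ power r, power ≤ r → r < findPowA fuel n power → 2 ^ r < n := by
  induction fuel with
  | zero => intro power r h1 h2; rw [findPowA] at h2; omega
  | succ fuel ih =>
    intro power r h1 h2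
    rw [findPowA] at h2
    by_cases hc : n - 2 ^ power > 0
    · rw [if_pos hc] at h2
      rcases Nat.eq_or_lt_of_le h1 with rfl | hlt
      · omega
      · exact ih (power + 1) r (by omega) h2
    · rw [if_neg hc] at h2; omega

theorem findP_spec (fuel : Nat) : ∀ p k, 1 ≤ p → p ≤ k → k < p * 2 ^ fuel →
    findP fuel p k ≤ k ∧ k < 2 * findP fuel p k ∧ ∃ j, findP fuel p k = p * 2 ^ j := by
  induction fuel with
  | zero =>
    intro p k hp hpk hlt
    rw [pow_zero, Nat.mul_one] at hlt
    omega
  | succ fuel ih =>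
    intro p k hp hpk hlt
    rw [findP]
    by_cases hc : 2 * p ≤ k
    · rw [if_pos hc]
      have e : p * 2 ^ (fuel + 1) = 2 * p * 2 ^ fuel := by ring
      obtain ⟨h1, h2, j, h3⟩ := ih (2 * p) k (by omega) (by omega) (by rw [← e]; exact hlt)
      exact ⟨h1, h2, j + 1, by rw [h3]; ring⟩
    · rw [if_neg hc]
      exact ⟨hpk, by omega, 0, by rw [pow_zero, Nat.mul_one]⟩

theorem pow2_unique (a b k : Nat) (h1 : 2 ^ a ≤ k) (h2 : k < 2 ^ (a + 1))
    (h3 : 2 ^ b ≤ k) (h4 : k < 2 ^ (b + 1)) : a = b := by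
  have ha : 2 ^ a < 2 ^ (b + 1) := lt_of_le_of_lt h1 h4
  have hb : 2 ^ b < 2 ^ (a + 1) := lt_of_le_of_lt h3 h2
  have := (Nat.pow_lt_pow_iff_right (by norm_num : 1 < 2)).mp ha
  have := (Nat.pow_lt_pow_iff_right (by norm_num : 1 < 2)).mp hb
  omega

-- findP k 1 k for k ≥ 1: the unique power of two p with p ≤ k < 2p
theorem findP_one (k : Nat) (hk : 1 ≤ k) :
    findP k 1 k ≤ k ∧ k < 2 * findP k 1 k ∧ ∃ j, findP k 1 k = 2 ^ j := by
  have hlt : k < 1 * 2 ^ k := by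
    rw [Nat.one_mul]
    exact Nat.lt_two_pow_self
  obtain ⟨h1, h2, j, h3⟩ := findP_spec k 1 k le_rfl hk hlt
  exact ⟨h1, h2, j, by omega⟩

-- reference value of toothpick1 on positive arguments
def T (k : Nat) : Int :=
  if k = 0 then 0
  else if k = 1 then 1
  else
    let p := findP k 1 k
    if _h : p = k then (k : Int) else 2 * T (k - p) + T (k - p + 1)
termination_by k
decreasing_by
  all_goals
    obtain ⟨h1, h2, -⟩ := findP_one k (by omega)
    omega

theorem T_pow2 (k : Nat) (hk : 2 ≤ k) (h : findP k 1 k = k) : T k = (k : Int) := by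
  rw [T]
  simp only [if_neg (by omega : ¬ k = 0), if_neg (by omega : ¬ k = 1)]
  rw [dif_pos h]

theorem T_rec (k : Nat) (hk : 2 ≤ k) (h : findP k 1 k ≠ k) :
    T k = 2 * T (k - findP k 1 k) + T (k - findP k 1 k + 1) := by
  rw [T]
  simp only [if_neg (by omega : ¬ k = 0), if_neg (by omega : ¬ k = 1)]
  rw [dif_neg h]

-- the two loops find the same power of two: 2 ^ (findPowA k 0) is the least
-- power of two ≥ k, findP k 1 k the greatest ≤ k
theorem pow_findPowA (m : Nat) (hm : 2 ≤ m) :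
    1 ≤ findPowA (m + 1) (m : Int) 0 ∧ (m : Int) ≤ 2 ^ (findPowA (m + 1) (m : Int) 0) ∧
      (2 : Int) ^ (findPowA (m + 1) (m : Int) 0 - 1) < m := by
  set P := findPowA (m + 1) (m : Int) 0 with hP
  have hle : (m : Int) ≤ 2 ^ P := by
    apply findPowA_le (m + 1) (m : Int) 0
    have h1 : m < 2 ^ m := Nat.lt_two_pow_self
    have h2 : (2:Nat) ^ m ≤ 2 ^ (0 + (m + 1)) := Nat.pow_le_pow_right (by norm_num) (by omega)
    have h3 : ((2 ^ (0 + (m + 1)) : Nat) : Int) = 2 ^ (0 + (m + 1)) := by push_cast; ring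
    omega
  have hP1 : 1 ≤ P := by
    by_contra h
    have : P = 0 := by omega
    rw [this] at hle; simp at hle; omega
  have hlt : (2 : Int) ^ (P - 1) < m := findPowA_min (m + 1) (m : Int) 0 (P - 1) (by omega) (by omega)
  exact ⟨hP1, hle, hlt⟩

theorem toothpick1_eq_T (m : Nat) : ∀ (fuel : Nat), 1 ≤ m → m ≤ fuel →
    toothpick1 fuel (m : Int) = T m := by
  induction m using Nat.strong_induction_on with
  | _ m ih =>
    intro fuel h1 hf
    match fuel with
    | 0 => omega
    | fuel + 1 =>
      by_cases hm1 : m = 1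
      · subst hm1
        simp [toothpick1, T]
      · have hm2 : 2 ≤ m := by omega
        obtain ⟨hP1, hle, hlt⟩ := pow_findPowA m hm2
        set P := findPowA (m + 1) (m : Int) 0 with hP
        -- Nat versions of the power bounds
        have hleN : m ≤ 2 ^ P := by exact_mod_cast hle
        have hltN : 2 ^ (P - 1) < m := by exact_mod_cast hlt
        have hpow : 2 ^ P = 2 * 2 ^ (P - 1) := by
          calc 2 ^ P = 2 ^ ((P - 1) + 1) := by congr 1; omega
            _ = 2 ^ (P - 1) * 2 := pow_succ 2 (P - 1)
            _ = 2 * 2 ^ (P - 1) := by ring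
        have hc : ((2 : Int) ^ P) = ((2 ^ P : Nat) : Int) := by push_cast; ring
        have hc' : ((2 : Int) ^ (P - 1)) = ((2 ^ (P - 1) : Nat) : Int) := by push_cast; ring
        rw [toothpick1]
        simp only [if_neg (by omega : ¬ (m : Int) = 0), if_neg (by omega : ¬ (m : Int) = 1),
          Int.toNat_natCast, ← hP]
        by_cases hpow2 : (m : Int) - 2 ^ P = 0
        · -- m is a power of two: both sides return m
          have hmP : m = 2 ^ P := by exact_mod_cast (by omega : (m : Int) = 2 ^ P)
          rw [if_pos hpow2]
          have hfp : findP m 1 m = m := by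
            obtain ⟨g1, g2, j, g3⟩ := findP_one m (by omega)
            have e1 : 2 ^ (j + 1) = 2 * findP m 1 m := by rw [g3, pow_succ]; ring
            have e2 : 2 ^ (P + 1) = 2 * 2 ^ P := by rw [pow_succ]; ring
            have : j = P := pow2_unique j P m (by omega) (by omega) (by omega) (by omega)
            rw [g3, this, ← hmP]
          rw [T_pow2 m hm2 hfp]
          omega
        · rw [if_neg hpow2]
          -- the recursive branch: A recurses on i = m - 2^(P-1) and i+1
          have hfp : findP m 1 m = 2 ^ (P - 1) := by
            obtain ⟨g1, g2, j, g3⟩ := findP_one m (by omega)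
            have hmlt : m < 2 ^ P := by omega
            have e1 : 2 ^ (j + 1) = 2 * findP m 1 m := by rw [g3, pow_succ]; ring
            have e2 : 2 ^ (P - 1 + 1) = 2 ^ P := by congr 1; omega
            have : j = P - 1 := pow2_unique j (P - 1) m (by omega) (by omega) (by omega) (by omega)
            rw [g3, this]
          have hne : findP m 1 m ≠ m := by
            rw [hfp]; omega
          rw [T_rec m hm2 hne, hfp]
          -- identify the Int recursion arguments with their Nat values
          have hiN : ((m : Int) - 2 ^ (P - 1)).toNat = m - 2 ^ (P - 1) := by
            omega
          have hi1N : ((m : Int) - 2 ^ (P - 1) + 1).toNat = m - 2 ^ (P - 1) + 1 := by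
            omega
          have e1 : (m : Int) - 2 ^ (P - 1) = ((m - 2 ^ (P - 1) : Nat) : Int) := by omega
          have e2 : (m : Int) - 2 ^ (P - 1) + 1 = ((m - 2 ^ (P - 1) + 1 : Nat) : Int) := by omega
          have hP2 : 2 ≤ P := by
            by_contra h
            have hPe : P = 1 := by omega
            rw [hPe] at hleN hpow2
            have : (2:Nat) ^ 1 = 2 := by norm_num
            rw [this] at hleN
            have : (2:Int) ^ 1 = 2 := by norm_num
            rw [this] at hpow2
            omega
          have hbig : 2 ≤ 2 ^ (P - 1) := by
            calc 2 = 2 ^ 1 := by norm_num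
            _ ≤ 2 ^ (P - 1) := Nat.pow_le_pow_right (by norm_num) (by omega)
          have r1 : toothpick1 fuel ((m : Int) - 2 ^ (P - 1)) = T (m - 2 ^ (P - 1)) := by
            rw [e1]
            exact ih _ (by omega) fuel (by omega) (by omega)
          have r2 : toothpick1 fuel ((m : Int) - 2 ^ (P - 1) + 1) = T (m - 2 ^ (P - 1) + 1) := by
            rw [e2]
            exact ih _ (by omega) fuel (by omega) (by omega)
          rw [r1, r2]

theorem buildT_eq (m : Nat) : buildT m = (List.range (m + 1)).map T := by
  induction m using buildT.induct with
  | case1 => simp [buildT, List.range_succ, T]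
  | case2 => simp [buildT, List.range_succ, T]
  | case3 k ih =>
    rw [buildT, ih, List.range_succ (n := k + 2), List.map_append]
    congr 1
    simp only [List.map_cons, List.map_nil]
    congr 1
    -- tval on the table [T 0, …, T (k+1)] computes T (k+2)
    obtain ⟨g1, g2, j, g3⟩ := findP_one (k + 2) (by omega)
    have hgetD : ∀ i, i < k + 2 → ((List.range (k + 2)).map T).getD i 0 = T i := by
      intro i hi
      rw [List.getD_eq_getElem _ _ (by simpa using hi)]
      simp
    by_cases hp : findP (k + 2) 1 (k + 2) = k + 2
    · rw [tval, T_pow2 (k + 2) (by omega) hp]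
      simp [hp]
    · have hplt : findP (k + 2) 1 (k + 2) < k + 2 := by omega
      have hp2 : 2 ≤ findP (k + 2) 1 (k + 2) := by omega
      rw [tval, T_rec (k + 2) (by omega) hp]
      simp only [if_neg hp]
      rw [hgetD _ (by omega), hgetD _ (by omega)]

theorem sum_shift (N : Nat) : ∀ (f : Nat → Int),
    ((List.range N).map (fun k => f (N - k))).sum =
      ((List.range N).map (fun k => f (k + 1))).sum := by
  induction N with
  | zero => intro f; simp
  | succ N ih =>
    intro f
    have hcong : (List.range N).map (fun k => f (N + 1 - k)) =
        (List.range N).map (fun k => (fun j => f (j + 1)) (N - k)) := by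
      apply List.map_congr_left
      intro k hk
      have : k < N := List.mem_range.mp hk
      simp only []
      congr 1
      omega
    conv_lhs => rw [List.range_succ]
    conv_rhs => rw [List.range_succ_eq_map]
    rw [List.map_append, List.sum_append, hcong, ih (fun j => f (j + 1))]
    have hNN : N + 1 - N = 1 := by omega
    have hsucc : ((fun k => f (k + 1)) ∘ (fun k => k + 1)) = (fun k => f (k + 1 + 1)) := rfl
    simp only [List.map_cons, List.map_nil, List.sum_cons, List.sum_nil, List.map_map, hNN, hsucc]
    ring

-- ===== VERDICT (by name: the statement is the Claim_ definition above) =====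
theorem toothpick_spec : Claim_equal_toothpick := by
  intro n _
  unfold Spec_toothpick toothpick toothpick_alt
  by_cases hn : n ≤ 0
  · rw [PySem.List.pyRange_one_eq_nil hn]
    simp [hn]
  · rw [if_neg (by omega)]
    rw [PySem.List.foldl_add (g := fun i => toothpick1 (n - i).toNat (n - i))]
    set N := n.toNat with hN
    have hnN : n = (N : Int) := by omega
    have hpr : PySem.List.pyRange 0 n 1 = (List.range N).map (fun k : Nat => (k : Int)) := by
      rw [PySem.List.pyRange_one]
      have h0 : (n - 0).toNat = N := by omega
      rw [h0]
      apply List.map_congr_left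
      intro k _
      omega
    rw [hpr, List.map_map]
    have hmap : (List.range N).map
        ((fun i => toothpick1 (n - i).toNat (n - i)) ∘ fun k : Nat => (k : Int)) =
        (List.range N).map (fun k => T (N - k)) := by
      apply List.map_congr_left
      intro k hk
      have hkN : k < N := List.mem_range.mp hk
      simp only [Function.comp]
      have e : n - (k : Int) = ((N - k : Nat) : Int) := by omega
      have et : (n - (k : Int)).toNat = N - k := by omega
      rw [e, Int.toNat_natCast]
      exact toothpick1_eq_T (N - k) (N - k) (by omega) le_rfl
    rw [hmap, sum_shift N T, buildT_eq N, List.range_succ_eq_map]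
    simp only [List.map_cons, List.map_map, List.drop_succ_cons, List.drop_zero, zero_add]
    have hT0 : (T ∘ Nat.succ) = fun k => T (k + 1) := rfl
    rw [hT0]
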